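-- pv_equiv track=rewrite | github.com/seL4/l4v | tools/haskell-translator/lhs_pars.py | monad_type_acquire
-- ===== SOURCE A (Python) =====
-- def monad_type_acquire(sig, type=0):
--     # note kernel appears after kernel_f/kernel_monad
--     for (key, n) in [('kernel_f', 1), ('fault_monad', 1), ('syscall_monad', 2),
--                      ('kernel_monad', 0), ('kernel_init', 1), ('kernel_p', 1),
--                      ('kernel', 0)]:
--         if key in sig:
--             sigend = sig.split(key)[-1]
--             return monad_type_acquire(sigend, n)
--
--     return type
-- ===== SOURCE B (Python) =====
-- def monad_type_acquire(sig, type=0):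
--     # Single left-to-right scan: the answer is the classification of the
--     # rightmost key occurrence (ties at a position broken by table order),
--     # or the default `type` if no key occurs.
--     keys = [('kernel_f', 1), ('fault_monad', 1), ('syscall_monad', 2),
--             ('kernel_monad', 0), ('kernel_init', 1), ('kernel_p', 1),
--             ('kernel', 0)]
--     for i in range(len(sig)):
--         for key, n in keys:
--             if sig.startswith(key, i):
--                 type = n
--                 break
--     return type
-- ===== Notes on version B (the rewrite author's own statement) =====
-- stated objective: alternative
-- what changed: Replaces A's split-at-last-occurrence-and-recurse with a single left-to-right scan over positions that records the classification of the rightmost key occurrence (ties at a position broken by table order), returning the default when no key occurs.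
import Mathlib
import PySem

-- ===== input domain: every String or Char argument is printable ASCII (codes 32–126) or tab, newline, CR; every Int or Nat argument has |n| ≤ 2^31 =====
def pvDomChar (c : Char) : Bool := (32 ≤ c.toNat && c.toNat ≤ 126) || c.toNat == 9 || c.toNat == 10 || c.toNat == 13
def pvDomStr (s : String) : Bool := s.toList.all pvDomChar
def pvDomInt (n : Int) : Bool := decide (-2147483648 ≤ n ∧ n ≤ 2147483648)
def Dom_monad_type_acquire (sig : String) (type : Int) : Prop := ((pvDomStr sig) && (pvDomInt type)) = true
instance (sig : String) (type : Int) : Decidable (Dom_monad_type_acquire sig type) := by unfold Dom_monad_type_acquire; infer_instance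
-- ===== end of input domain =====

-- B replaces A's split-and-recurse with a single left-to-right scan that keeps the
-- classification of the rightmost key occurrence; objective: alternative (same cost).

-- ===== PORT A =====
-- sig.split(key)[-1]; split(key) with key ≠ '' never raises and never returns [], so [-1] is getLastD
def pvSuffix (s key : List Char) : List Char := (PySem.Chars.splitOn s key).getLastD []

-- termination fact cited by port A's decreasing_by: if a nonempty key occurs in l,
-- then l decomposes as pre ++ key ++ (piece after the key's LAST occurrence)
theorem pvGoDecomp (sep : List Char) (hsep : sep ≠ []) :
    ∀ fuel l cur acc, l.length < fuel →
      (sep <:+: l → ∃ pre, l = pre ++ (sep ++ (PySem.Chars.splitOn.go sep fuel l cur acc).getLastD [])) ∧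
      (¬ sep <:+: l → (PySem.Chars.splitOn.go sep fuel l cur acc).getLastD [] = cur.reverse ++ l) := by
  intro fuel
  induction fuel with
  | zero => intro l cur acc h; omega
  | succ n ih =>
    intro l cur acc h
    match l with
    | [] =>
      constructor
      · intro hin
        exact absurd (List.eq_nil_of_infix_nil hin) hsep
      · intro _
        simp [PySem.Chars.splitOn.go, List.getLastD_eq_getLast?, List.getLast?_reverse]
    | c :: rest =>
      have hgo : PySem.Chars.splitOn.go sep (n+1) (c :: rest) cur acc =
          if sep.isPrefixOf (c :: rest) = true then
            PySem.Chars.splitOn.go sep n (List.drop sep.length (c :: rest)) [] (cur.reverse :: acc)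
          else PySem.Chars.splitOn.go sep n rest (c :: cur) acc := by
        simp [PySem.Chars.splitOn.go]
      by_cases hp : sep.isPrefixOf (c :: rest) = true
      · have hpre : sep <+: (c :: rest) := List.isPrefixOf_iff_prefix.mp hp
        obtain ⟨tl, htl⟩ := hpre
        have h1 : 1 ≤ sep.length := List.length_pos_iff.mpr hsep
        have hdrop : List.drop sep.length (c :: rest) = tl := by
          rw [← htl, List.drop_left]
        have hlen : tl.length < n := by
          have := congrArg List.length htl
          simp [List.length_append] at this
          simp only [List.length_cons] at h
          omega
        have hih := ih tl [] (cur.reverse :: acc) hlen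
        rw [hgo, if_pos hp, hdrop]
        constructor
        · intro _
          by_cases hin : sep <:+: tl
          · obtain ⟨pre', hpre'⟩ := hih.1 hin
            refine ⟨sep ++ pre', ?_⟩
            rw [List.append_assoc, ← hpre', htl]
          · have hres := hih.2 hin
            simp only [List.reverse_nil, List.nil_append] at hres
            refine ⟨[], ?_⟩
            rw [List.nil_append, hres, htl]
        · intro hni
          exact absurd (htl ▸ (List.prefix_append sep tl).isInfix) hni
      · have hnpre : ¬ sep <+: (c :: rest) := fun hx => hp (List.isPrefixOf_iff_prefix.mpr hx)
        have hlen : rest.length < n := by simp only [List.length_cons] at h; omega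
        have hih := ih rest (c :: cur) acc hlen
        rw [hgo, if_neg hp]
        constructor
        · intro hin
          have hin' : sep <:+: rest := by
            rcases (List.infix_cons_iff).mp hin with hx | hx
            · exact absurd hx hnpre
            · exact hx
          obtain ⟨pre', hpre'⟩ := hih.1 hin'
          exact ⟨c :: pre', by rw [List.cons_append]; rw [← hpre']⟩
        · intro hni
          have hni' : ¬ sep <:+: rest := fun hx => hni (List.infix_cons_iff.mpr (Or.inr hx))
          rw [hih.2 hni']
          simp

theorem pvSuffix_decomp (s key : List Char) (hk : key ≠ [])
    (h : PySem.Chars.isIn key s = true) :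
    ∃ pre, s = pre ++ (key ++ pvSuffix s key) := by
  have hin : key <:+: s := (PySem.Chars.isIn_iff_infix key s).mp h
  have := (pvGoDecomp key hk (s.length + 1) s [] [] (by omega)).1 hin
  unfold pvSuffix PySem.Chars.splitOn
  exact this

theorem pvSuffix_len_lt (s key : List Char) (hk : key ≠ [])
    (h : PySem.Chars.isIn key s = true) : (pvSuffix s key).length < s.length := by
  obtain ⟨pre, hpre⟩ := pvSuffix_decomp s key hk h
  have h1 : 1 ≤ key.length := List.length_pos_iff.mpr hk
  have := congrArg List.length hpre
  simp [List.length_append] at this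
  omega

-- A's for-loop over the literal 7-pair list with early return = the if-chain in the same
-- order, each hit returning the recursive call on sig.split(key)[-1]
def pvA (sig : List Char) (type : Int) : Int :=
  if _h1 : PySem.Chars.isIn "kernel_f".toList sig = true then pvA (pvSuffix sig "kernel_f".toList) 1
  else if _h2 : PySem.Chars.isIn "fault_monad".toList sig = true then pvA (pvSuffix sig "fault_monad".toList) 1
  else if _h3 : PySem.Chars.isIn "syscall_monad".toList sig = true then pvA (pvSuffix sig "syscall_monad".toList) 2
  else if _h4 : PySem.Chars.isIn "kernel_monad".toList sig = true then pvA (pvSuffix sig "kernel_monad".toList) 0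
  else if _h5 : PySem.Chars.isIn "kernel_init".toList sig = true then pvA (pvSuffix sig "kernel_init".toList) 1
  else if _h6 : PySem.Chars.isIn "kernel_p".toList sig = true then pvA (pvSuffix sig "kernel_p".toList) 1
  else if _h7 : PySem.Chars.isIn "kernel".toList sig = true then pvA (pvSuffix sig "kernel".toList) 0
  else type
termination_by sig.length
decreasing_by
  all_goals exact pvSuffix_len_lt _ _ (by decide) ‹_›

def monad_type_acquire (sig : String) (type : Int) : Int := pvA sig.toList type

-- ===== PORT B =====
-- B's fixed key table
def pvKeys : List (List Char × Int) :=
  [("kernel_f".toList, 1), ("fault_monad".toList, 1), ("syscall_monad".toList, 2),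
   ("kernel_monad".toList, 0), ("kernel_init".toList, 1), ("kernel_p".toList, 1),
   ("kernel".toList, 0)]

-- the inner for…break of Source B: first key of the table that starts at this position
def pvKeyAt (l : List Char) : Option Int :=
  (pvKeys.find? (fun p => p.1.isPrefixOf l)).map Prod.snd

-- Source B's outer for over positions i (position i = the i-th suffix), overwriting `type`
def pvScan : List Char → Int → Int
  | [], t => t
  | c :: rest, t => pvScan rest ((pvKeyAt (c :: rest)).getD t)

def monad_type_acquire_alt (sig : String) (type : Int) : Int := pvScan sig.toList type

-- ===== PRECONDITION & SPEC =====
def Spec_monad_type_acquire (sig : String) (type : Int) (out : Int) : Prop := out = monad_type_acquire_alt sig type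
instance (sig : String) (type : Int) (out : Int) : Decidable (Spec_monad_type_acquire sig type out) := by unfold Spec_monad_type_acquire; infer_instance

-- ===== CLAIM (what is proved, stated in full; the proofs are below) =====
def Claim_equal_monad_type_acquire : Prop := ∀ (sig : String) (type : Int), Dom_monad_type_acquire sig type → Spec_monad_type_acquire sig type (monad_type_acquire sig type)

-- ===== LEMMAS AND PROOFS =====

-- the value accumulated by the scan while it crosses x (looking ahead into y)
def pvScanAcc : List Char → List Char → Int → Int
  | [], _, t => t
  | c :: r, y, t => pvScanAcc r y ((pvKeyAt ((c :: r) ++ y)).getD t)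

theorem pvScan_append : ∀ (x y : List Char) (t : Int),
    pvScan (x ++ y) t = pvScan y (pvScanAcc x y t) := by
  intro x
  induction x with
  | nil => intro y t; rfl
  | cons c r ih =>
    intro y t
    show pvScan (r ++ y) _ = _
    rw [ih]
    rfl

theorem pvScanAcc_const : ∀ (w y : List Char) (v : Int),
    (∀ w', w' <:+ w → w' ≠ [] → ∀ n, pvKeyAt (w' ++ y) = some n → n = v) →
    pvScanAcc w y v = v := by
  intro w
  induction w with
  | nil => intro y v _; rfl
  | cons c r ih =>
    intro y v hcond
    show pvScanAcc r y ((pvKeyAt ((c :: r) ++ y)).getD v) = v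
    have hv : (pvKeyAt ((c :: r) ++ y)).getD v = v := by
      cases hk : pvKeyAt ((c :: r) ++ y) with
      | none => rfl
      | some n =>
        simp [hcond (c :: r) (List.suffix_refl _) (by simp) n hk]
    rw [hv]
    exact ih y v (fun w' hs hne n hk =>
      hcond w' (hs.trans (List.suffix_cons c r)) hne n hk)

-- at no positive offset inside a key can a differently-valued key occurrence start:
-- the only prefix-comparable pair (proper suffix of a key, key) is ('f', fault_monad),
-- and fault_monad carries kernel_f's value 1
theorem pvTailFact : ∀ kp ∈ pvKeys, ∀ w' ∈ kp.1.tail.tails, w' ≠ [] →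
    ∀ kq ∈ pvKeys, (kq.1 <+: w' ∨ w' <+: kq.1) → kq.2 = kp.2 := by decide

-- crossing the tail of a matched key cannot change the recorded value
theorem pvScanAcc_tail (kp : List Char × Int) (hmem : kp ∈ pvKeys) (suf : List Char) :
    pvScanAcc kp.1.tail suf kp.2 = kp.2 := by
  apply pvScanAcc_const
  intro w' hs hne n hk
  unfold pvKeyAt at hk
  obtain ⟨kq, hfind, hsnd⟩ := Option.map_eq_some_iff.mp hk
  have hkqmem : kq ∈ pvKeys := List.mem_of_find?_eq_some hfind
  have hkqpre : kq.1 <+: w' ++ suf := by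
    have := List.find?_some hfind
    exact List.isPrefixOf_iff_prefix.mp (by simpa using this)
  have hor : kq.1 <+: w' ∨ w' <+: kq.1 :=
    List.prefix_or_prefix_of_prefix hkqpre (List.prefix_append w' suf)
  rw [← hsnd]
  exact pvTailFact kp hmem w' ((List.mem_tails _ _).mpr hs) hne kq hkqmem hor

-- scanning across a key occurrence (whose first table hit at that position is (k, n))
-- leaves the scan on the remaining suffix with value n
theorem pvScan_key (k : List Char) (n : Int) (hmem : (k, n) ∈ pvKeys) (hne : k ≠ [])
    (suf : List Char) (hhead : pvKeyAt (k ++ suf) = some n) (t : Int) :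
    pvScan (k ++ suf) t = pvScan suf n := by
  obtain ⟨c, ktail, rfl⟩ : ∃ c kt, k = c :: kt := by
    cases k with
    | nil => exact absurd rfl hne
    | cons c kt => exact ⟨c, kt, rfl⟩
  show pvScan (ktail ++ suf) ((pvKeyAt ((c :: ktail) ++ suf)).getD t) = pvScan suf n
  rw [hhead]
  simp only [Option.getD_some]
  rw [pvScan_append]
  have h2 := pvScanAcc_tail (c :: ktail, n) hmem suf
  simp only [List.tail_cons] at h2
  rw [h2]

-- a key absent from pre ++ rest is not a prefix of rest
theorem pvPrefFalse (k pre rest : List Char)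
    (h : ¬ PySem.Chars.isIn k (pre ++ rest) = true) : k.isPrefixOf rest = false := by
  by_contra hx
  have hp : k <+: rest := List.isPrefixOf_iff_prefix.mp (by
    cases hb : k.isPrefixOf rest
    · exact absurd hb hx
    · rfl)
  exact h ((PySem.Chars.isIn_iff_infix k (pre ++ rest)).mpr
    (hp.isInfix.trans (List.suffix_append pre rest).isInfix))

theorem pvPrefNot (k pre rest : List Char)
    (h : ¬ PySem.Chars.isIn k (pre ++ rest) = true) : ¬ k <+: rest := by
  intro hp
  have := pvPrefFalse k pre rest h
  rw [List.isPrefixOf_iff_prefix.mpr hp] at this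
  exact Bool.noConfusion this

-- if no key occurs in sig, the scan returns its default
theorem pvScan_nokey (sig : List Char) (t : Int)
    (hcond : ∀ w', w' <:+ sig → w' ≠ [] → ∀ n, pvKeyAt w' = some n → n = t) :
    pvScan sig t = t := by
  have h1 : pvScan (sig ++ []) t = pvScan [] (pvScanAcc sig [] t) := pvScan_append sig [] t
  rw [List.append_nil] at h1
  rw [h1]
  show pvScanAcc sig [] t = t
  apply pvScanAcc_const
  intro w' hs hne n hk
  rw [List.append_nil] at hk
  exact hcond w' hs hne n hk

-- main equivalence, by strong induction on the string length
theorem pvAB : ∀ (N : Nat) (sig : List Char), sig.length < N → ∀ t, pvA sig t = pvScan sig t := by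
  intro N
  induction N with
  | zero => intro sig hc; omega
  | succ N ih =>
    intro sig hlen t
    by_cases h1 : PySem.Chars.isIn "kernel_f".toList sig = true
    · obtain ⟨pre, hd⟩ := pvSuffix_decomp sig "kernel_f".toList (by decide) h1
      have ha : pvA sig t = pvA (pvSuffix sig "kernel_f".toList) 1 := by rw [pvA, dif_pos h1]
      have hhead : pvKeyAt ("kernel_f".toList ++ pvSuffix sig "kernel_f".toList) = some 1 := by
        unfold pvKeyAt pvKeys
        rw [
          List.find?_cons_of_pos (p := fun q : List Char × Int => q.1.isPrefixOf ("kernel_f".toList ++ pvSuffix sig "kernel_f".toList)) (by exact List.isPrefixOf_iff_prefix.mpr (List.prefix_append _ _))]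
        rfl
      have hb : pvScan sig t = pvScan (pvSuffix sig "kernel_f".toList) 1 := by
        conv_lhs => rw [hd]
        rw [pvScan_append]
        exact pvScan_key "kernel_f".toList 1 (by decide) (by decide) _ hhead _
      rw [ha, hb]
      exact ih _ (by have := pvSuffix_len_lt sig "kernel_f".toList (by decide) h1; omega) 1
    ·
      by_cases h2 : PySem.Chars.isIn "fault_monad".toList sig = true
      · obtain ⟨pre, hd⟩ := pvSuffix_decomp sig "fault_monad".toList (by decide) h2
        have ha : pvA sig t = pvA (pvSuffix sig "fault_monad".toList) 1 := by rw [pvA, dif_neg h1, dif_pos h2]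
        have hhead : pvKeyAt ("fault_monad".toList ++ pvSuffix sig "fault_monad".toList) = some 1 := by
          unfold pvKeyAt pvKeys
          rw [
              List.find?_cons_of_neg (p := fun q : List Char × Int => q.1.isPrefixOf ("fault_monad".toList ++ pvSuffix sig "fault_monad".toList)) (fun hx => pvPrefNot "kernel_f".toList pre _ (hd ▸ h1) (List.isPrefixOf_iff_prefix.mp hx)),
            List.find?_cons_of_pos (p := fun q : List Char × Int => q.1.isPrefixOf ("fault_monad".toList ++ pvSuffix sig "fault_monad".toList)) (by exact List.isPrefixOf_iff_prefix.mpr (List.prefix_append _ _))]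
          rfl
        have hb : pvScan sig t = pvScan (pvSuffix sig "fault_monad".toList) 1 := by
          conv_lhs => rw [hd]
          rw [pvScan_append]
          exact pvScan_key "fault_monad".toList 1 (by decide) (by decide) _ hhead _
        rw [ha, hb]
        exact ih _ (by have := pvSuffix_len_lt sig "fault_monad".toList (by decide) h2; omega) 1
      ·
        by_cases h3 : PySem.Chars.isIn "syscall_monad".toList sig = true
        · obtain ⟨pre, hd⟩ := pvSuffix_decomp sig "syscall_monad".toList (by decide) h3
          have ha : pvA sig t = pvA (pvSuffix sig "syscall_monad".toList) 2 := by rw [pvA, dif_neg h1, dif_neg h2, dif_pos h3]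
          have hhead : pvKeyAt ("syscall_monad".toList ++ pvSuffix sig "syscall_monad".toList) = some 2 := by
            unfold pvKeyAt pvKeys
            rw [
                List.find?_cons_of_neg (p := fun q : List Char × Int => q.1.isPrefixOf ("syscall_monad".toList ++ pvSuffix sig "syscall_monad".toList)) (fun hx => pvPrefNot "kernel_f".toList pre _ (hd ▸ h1) (List.isPrefixOf_iff_prefix.mp hx)),
                List.find?_cons_of_neg (p := fun q : List Char × Int => q.1.isPrefixOf ("syscall_monad".toList ++ pvSuffix sig "syscall_monad".toList)) (fun hx => pvPrefNot "fault_monad".toList pre _ (hd ▸ h2) (List.isPrefixOf_iff_prefix.mp hx)),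
              List.find?_cons_of_pos (p := fun q : List Char × Int => q.1.isPrefixOf ("syscall_monad".toList ++ pvSuffix sig "syscall_monad".toList)) (by exact List.isPrefixOf_iff_prefix.mpr (List.prefix_append _ _))]
            rfl
          have hb : pvScan sig t = pvScan (pvSuffix sig "syscall_monad".toList) 2 := by
            conv_lhs => rw [hd]
            rw [pvScan_append]
            exact pvScan_key "syscall_monad".toList 2 (by decide) (by decide) _ hhead _
          rw [ha, hb]
          exact ih _ (by have := pvSuffix_len_lt sig "syscall_monad".toList (by decide) h3; omega) 2
        ·
          by_cases h4 : PySem.Chars.isIn "kernel_monad".toList sig = true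
          · obtain ⟨pre, hd⟩ := pvSuffix_decomp sig "kernel_monad".toList (by decide) h4
            have ha : pvA sig t = pvA (pvSuffix sig "kernel_monad".toList) 0 := by rw [pvA, dif_neg h1, dif_neg h2, dif_neg h3, dif_pos h4]
            have hhead : pvKeyAt ("kernel_monad".toList ++ pvSuffix sig "kernel_monad".toList) = some 0 := by
              unfold pvKeyAt pvKeys
              rw [
                  List.find?_cons_of_neg (p := fun q : List Char × Int => q.1.isPrefixOf ("kernel_monad".toList ++ pvSuffix sig "kernel_monad".toList)) (fun hx => pvPrefNot "kernel_f".toList pre _ (hd ▸ h1) (List.isPrefixOf_iff_prefix.mp hx)),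
                  List.find?_cons_of_neg (p := fun q : List Char × Int => q.1.isPrefixOf ("kernel_monad".toList ++ pvSuffix sig "kernel_monad".toList)) (fun hx => pvPrefNot "fault_monad".toList pre _ (hd ▸ h2) (List.isPrefixOf_iff_prefix.mp hx)),
                  List.find?_cons_of_neg (p := fun q : List Char × Int => q.1.isPrefixOf ("kernel_monad".toList ++ pvSuffix sig "kernel_monad".toList)) (fun hx => pvPrefNot "syscall_monad".toList pre _ (hd ▸ h3) (List.isPrefixOf_iff_prefix.mp hx)),
                List.find?_cons_of_pos (p := fun q : List Char × Int => q.1.isPrefixOf ("kernel_monad".toList ++ pvSuffix sig "kernel_monad".toList)) (by exact List.isPrefixOf_iff_prefix.mpr (List.prefix_append _ _))]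
              rfl
            have hb : pvScan sig t = pvScan (pvSuffix sig "kernel_monad".toList) 0 := by
              conv_lhs => rw [hd]
              rw [pvScan_append]
              exact pvScan_key "kernel_monad".toList 0 (by decide) (by decide) _ hhead _
            rw [ha, hb]
            exact ih _ (by have := pvSuffix_len_lt sig "kernel_monad".toList (by decide) h4; omega) 0
          ·
            by_cases h5 : PySem.Chars.isIn "kernel_init".toList sig = true
            · obtain ⟨pre, hd⟩ := pvSuffix_decomp sig "kernel_init".toList (by decide) h5
              have ha : pvA sig t = pvA (pvSuffix sig "kernel_init".toList) 1 := by rw [pvA, dif_neg h1, dif_neg h2, dif_neg h3, dif_neg h4, dif_pos h5]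
              have hhead : pvKeyAt ("kernel_init".toList ++ pvSuffix sig "kernel_init".toList) = some 1 := by
                unfold pvKeyAt pvKeys
                rw [
                    List.find?_cons_of_neg (p := fun q : List Char × Int => q.1.isPrefixOf ("kernel_init".toList ++ pvSuffix sig "kernel_init".toList)) (fun hx => pvPrefNot "kernel_f".toList pre _ (hd ▸ h1) (List.isPrefixOf_iff_prefix.mp hx)),
                    List.find?_cons_of_neg (p := fun q : List Char × Int => q.1.isPrefixOf ("kernel_init".toList ++ pvSuffix sig "kernel_init".toList)) (fun hx => pvPrefNot "fault_monad".toList pre _ (hd ▸ h2) (List.isPrefixOf_iff_prefix.mp hx)),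
                    List.find?_cons_of_neg (p := fun q : List Char × Int => q.1.isPrefixOf ("kernel_init".toList ++ pvSuffix sig "kernel_init".toList)) (fun hx => pvPrefNot "syscall_monad".toList pre _ (hd ▸ h3) (List.isPrefixOf_iff_prefix.mp hx)),
                    List.find?_cons_of_neg (p := fun q : List Char × Int => q.1.isPrefixOf ("kernel_init".toList ++ pvSuffix sig "kernel_init".toList)) (fun hx => pvPrefNot "kernel_monad".toList pre _ (hd ▸ h4) (List.isPrefixOf_iff_prefix.mp hx)),
                  List.find?_cons_of_pos (p := fun q : List Char × Int => q.1.isPrefixOf ("kernel_init".toList ++ pvSuffix sig "kernel_init".toList)) (by exact List.isPrefixOf_iff_prefix.mpr (List.prefix_append _ _))]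
                rfl
              have hb : pvScan sig t = pvScan (pvSuffix sig "kernel_init".toList) 1 := by
                conv_lhs => rw [hd]
                rw [pvScan_append]
                exact pvScan_key "kernel_init".toList 1 (by decide) (by decide) _ hhead _
              rw [ha, hb]
              exact ih _ (by have := pvSuffix_len_lt sig "kernel_init".toList (by decide) h5; omega) 1
            ·
              by_cases h6 : PySem.Chars.isIn "kernel_p".toList sig = true
              · obtain ⟨pre, hd⟩ := pvSuffix_decomp sig "kernel_p".toList (by decide) h6
                have ha : pvA sig t = pvA (pvSuffix sig "kernel_p".toList) 1 := by rw [pvA, dif_neg h1, dif_neg h2, dif_neg h3, dif_neg h4, dif_neg h5, dif_pos h6]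
                have hhead : pvKeyAt ("kernel_p".toList ++ pvSuffix sig "kernel_p".toList) = some 1 := by
                  unfold pvKeyAt pvKeys
                  rw [
                      List.find?_cons_of_neg (p := fun q : List Char × Int => q.1.isPrefixOf ("kernel_p".toList ++ pvSuffix sig "kernel_p".toList)) (fun hx => pvPrefNot "kernel_f".toList pre _ (hd ▸ h1) (List.isPrefixOf_iff_prefix.mp hx)),
                      List.find?_cons_of_neg (p := fun q : List Char × Int => q.1.isPrefixOf ("kernel_p".toList ++ pvSuffix sig "kernel_p".toList)) (fun hx => pvPrefNot "fault_monad".toList pre _ (hd ▸ h2) (List.isPrefixOf_iff_prefix.mp hx)),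
                      List.find?_cons_of_neg (p := fun q : List Char × Int => q.1.isPrefixOf ("kernel_p".toList ++ pvSuffix sig "kernel_p".toList)) (fun hx => pvPrefNot "syscall_monad".toList pre _ (hd ▸ h3) (List.isPrefixOf_iff_prefix.mp hx)),
                      List.find?_cons_of_neg (p := fun q : List Char × Int => q.1.isPrefixOf ("kernel_p".toList ++ pvSuffix sig "kernel_p".toList)) (fun hx => pvPrefNot "kernel_monad".toList pre _ (hd ▸ h4) (List.isPrefixOf_iff_prefix.mp hx)),
                      List.find?_cons_of_neg (p := fun q : List Char × Int => q.1.isPrefixOf ("kernel_p".toList ++ pvSuffix sig "kernel_p".toList)) (fun hx => pvPrefNot "kernel_init".toList pre _ (hd ▸ h5) (List.isPrefixOf_iff_prefix.mp hx)),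
                    List.find?_cons_of_pos (p := fun q : List Char × Int => q.1.isPrefixOf ("kernel_p".toList ++ pvSuffix sig "kernel_p".toList)) (by exact List.isPrefixOf_iff_prefix.mpr (List.prefix_append _ _))]
                  rfl
                have hb : pvScan sig t = pvScan (pvSuffix sig "kernel_p".toList) 1 := by
                  conv_lhs => rw [hd]
                  rw [pvScan_append]
                  exact pvScan_key "kernel_p".toList 1 (by decide) (by decide) _ hhead _
                rw [ha, hb]
                exact ih _ (by have := pvSuffix_len_lt sig "kernel_p".toList (by decide) h6; omega) 1
              ·
                by_cases h7 : PySem.Chars.isIn "kernel".toList sig = true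
                · obtain ⟨pre, hd⟩ := pvSuffix_decomp sig "kernel".toList (by decide) h7
                  have ha : pvA sig t = pvA (pvSuffix sig "kernel".toList) 0 := by rw [pvA, dif_neg h1, dif_neg h2, dif_neg h3, dif_neg h4, dif_neg h5, dif_neg h6, dif_pos h7]
                  have hhead : pvKeyAt ("kernel".toList ++ pvSuffix sig "kernel".toList) = some 0 := by
                    unfold pvKeyAt pvKeys
                    rw [
                        List.find?_cons_of_neg (p := fun q : List Char × Int => q.1.isPrefixOf ("kernel".toList ++ pvSuffix sig "kernel".toList)) (fun hx => pvPrefNot "kernel_f".toList pre _ (hd ▸ h1) (List.isPrefixOf_iff_prefix.mp hx)),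
                        List.find?_cons_of_neg (p := fun q : List Char × Int => q.1.isPrefixOf ("kernel".toList ++ pvSuffix sig "kernel".toList)) (fun hx => pvPrefNot "fault_monad".toList pre _ (hd ▸ h2) (List.isPrefixOf_iff_prefix.mp hx)),
                        List.find?_cons_of_neg (p := fun q : List Char × Int => q.1.isPrefixOf ("kernel".toList ++ pvSuffix sig "kernel".toList)) (fun hx => pvPrefNot "syscall_monad".toList pre _ (hd ▸ h3) (List.isPrefixOf_iff_prefix.mp hx)),
                        List.find?_cons_of_neg (p := fun q : List Char × Int => q.1.isPrefixOf ("kernel".toList ++ pvSuffix sig "kernel".toList)) (fun hx => pvPrefNot "kernel_monad".toList pre _ (hd ▸ h4) (List.isPrefixOf_iff_prefix.mp hx)),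
                        List.find?_cons_of_neg (p := fun q : List Char × Int => q.1.isPrefixOf ("kernel".toList ++ pvSuffix sig "kernel".toList)) (fun hx => pvPrefNot "kernel_init".toList pre _ (hd ▸ h5) (List.isPrefixOf_iff_prefix.mp hx)),
                        List.find?_cons_of_neg (p := fun q : List Char × Int => q.1.isPrefixOf ("kernel".toList ++ pvSuffix sig "kernel".toList)) (fun hx => pvPrefNot "kernel_p".toList pre _ (hd ▸ h6) (List.isPrefixOf_iff_prefix.mp hx)),
                      List.find?_cons_of_pos (p := fun q : List Char × Int => q.1.isPrefixOf ("kernel".toList ++ pvSuffix sig "kernel".toList)) (by exact List.isPrefixOf_iff_prefix.mpr (List.prefix_append _ _))]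
                    rfl
                  have hb : pvScan sig t = pvScan (pvSuffix sig "kernel".toList) 0 := by
                    conv_lhs => rw [hd]
                    rw [pvScan_append]
                    exact pvScan_key "kernel".toList 0 (by decide) (by decide) _ hhead _
                  rw [ha, hb]
                  exact ih _ (by have := pvSuffix_len_lt sig "kernel".toList (by decide) h7; omega) 0
                · have ha : pvA sig t = t := by
                    rw [pvA, dif_neg h1, dif_neg h2, dif_neg h3, dif_neg h4, dif_neg h5, dif_neg h6, dif_neg h7]
                  have hb : pvScan sig t = t := by
                    apply pvScan_nokey
                    intro w' hs hne n hk
                    unfold pvKeyAt at hk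
                    obtain ⟨kq, hfind, hsnd⟩ := Option.map_eq_some_iff.mp hk
                    have hkqmem : kq ∈ pvKeys := List.mem_of_find?_eq_some hfind
                    have hkqpre : kq.1 <+: w' := by
                      have := List.find?_some hfind
                      exact List.isPrefixOf_iff_prefix.mp (by simpa using this)
                    have hin : PySem.Chars.isIn kq.1 sig = true :=
                      (PySem.Chars.isIn_iff_infix kq.1 sig).mpr (hkqpre.isInfix.trans hs.isInfix)
                    fin_cases hkqmem <;> simp_all
                  rw [ha, hb]

-- ===== VERDICT (by name: the statement is the Claim_ definition above) =====
theorem monad_type_acquire_spec : Claim_equal_monad_type_acquire := by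
  intro sig type _
  unfold Spec_monad_type_acquire monad_type_acquire monad_type_acquire_alt
  exact pvAB (sig.toList.length + 1) sig.toList (by omega) type
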